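-- pv_equiv track=rewrite | github.com/Baron1k1ta/ITMO | dm_labs/dm_sem4/B.py | calculate_final_result
-- ===== SOURCE A (Python) =====
-- mod = 998244353
--
-- def ensure_non_negative(elem):
--     return elem + mod if elem < 0 else elem
--
-- def calculate_final_result(func_vals, poly_degrees, m):
--     result = []
--     for i in range(m):
--         term = sum(
--             (func_vals[j] * poly_degrees[j][i]) % mod
--             for j in range(m)
--         ) % mod
--         result.append(ensure_non_negative(term))
--     return result
-- ===== SOURCE B (Python) =====
-- mod = 998244353
--
-- def calculate_final_result(func_vals, poly_degrees, m):
--     # Scatter/accumulate: one pass over the rows, maintaining a running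
--     # vector of partial sums, instead of a separate dot product per output.
--     acc = [0] * max(m, 0)
--     for fv, row in zip(func_vals[:m], poly_degrees[:m]):
--         acc = [a + (fv * x) % mod for a, x in zip(acc, row)]
--     return [a % mod for a in acc]
-- ===== Notes on version B (the rewrite author's own statement) =====
-- stated objective: alternative
-- what changed: Interchanges the loop nesting: instead of computing each output i by an inner dot-product scan over j, B makes one pass over the (func_val, row) pairs and scatters each row's contribution into a running vector of partial sums, taking a single final mod per entry (A's ensure_non_negative is provably a no-op since Python % with a positive modulus is non-negative).
import Mathlib
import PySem

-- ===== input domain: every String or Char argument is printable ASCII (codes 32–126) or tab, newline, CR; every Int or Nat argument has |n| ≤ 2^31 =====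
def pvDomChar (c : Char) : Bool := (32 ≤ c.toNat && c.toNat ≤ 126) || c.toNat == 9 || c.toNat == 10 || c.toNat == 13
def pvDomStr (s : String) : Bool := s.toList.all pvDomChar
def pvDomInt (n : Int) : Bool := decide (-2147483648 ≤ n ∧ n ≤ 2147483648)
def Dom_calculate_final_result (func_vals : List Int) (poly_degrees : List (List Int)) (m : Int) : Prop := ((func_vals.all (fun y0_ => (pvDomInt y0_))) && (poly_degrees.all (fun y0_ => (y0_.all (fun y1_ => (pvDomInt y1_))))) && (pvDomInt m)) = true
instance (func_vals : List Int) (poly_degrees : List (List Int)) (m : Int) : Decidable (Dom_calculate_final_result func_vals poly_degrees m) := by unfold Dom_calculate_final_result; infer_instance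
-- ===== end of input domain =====

-- B interchanges the loop nesting: one pass over the rows scattering into a running
-- vector of partial sums, with a single final mod per entry (alternative decomposition,
-- same asymptotic cost).

def pvMod : Int := 998244353

-- ===== PORT A =====
def ensure_non_negative (elem : Int) : Int :=
  if elem < 0 then elem + pvMod else elem

def calculate_final_result (func_vals : List Int) (poly_degrees : List (List Int)) (m : Int) : List Int :=
  (PySem.List.pyRange 0 m 1).foldl (fun result i =>
    let term := PySem.Int.mod
      ((PySem.List.pyRange 0 m 1).foldl
        (fun s j => s + PySem.Int.mod
          (PySem.List.pyGetD func_vals j 0 * PySem.List.pyGetD (PySem.List.pyGetD poly_degrees j []) i 0)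
          pvMod) 0)
      pvMod
    result ++ [ensure_non_negative term]) []

-- ===== PORT B =====
def calculate_final_result_alt (func_vals : List Int) (poly_degrees : List (List Int)) (m : Int) : List Int :=
  (((PySem.List.slice func_vals none (some m)).zip (PySem.List.slice poly_degrees none (some m))).foldl
      (fun a p => (a.zip p.2).map (fun q => q.1 + PySem.Int.mod (p.1 * q.2) pvMod))
      (List.replicate (max m 0).toNat 0)).map (fun a => PySem.Int.mod a pvMod)

-- ===== PRECONDITION & SPEC =====
-- Pre_ excludes exactly the inputs where A raises IndexError: m entries are read from
-- func_vals and poly_degrees, and each of the first m rows is read at indices 0..m-1.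
def Pre_calculate_final_result (func_vals : List Int) (poly_degrees : List (List Int)) (m : Int) : Prop :=
  m ≤ 0 ∨ (m.toNat ≤ func_vals.length ∧ m.toNat ≤ poly_degrees.length ∧
           ∀ row ∈ poly_degrees.take m.toNat, m.toNat ≤ row.length)
instance (func_vals : List Int) (poly_degrees : List (List Int)) (m : Int) : Decidable (Pre_calculate_final_result func_vals poly_degrees m) := by unfold Pre_calculate_final_result; infer_instance

def pvWitness_calculate_final_result : List Int × List (List Int) × Int :=
  ([1, 2], [[3, 4], [5, 6]], 2)

def Spec_calculate_final_result (func_vals : List Int) (poly_degrees : List (List Int)) (m : Int) (out : List Int) : Prop := out = calculate_final_result_alt func_vals poly_degrees m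
instance (func_vals : List Int) (poly_degrees : List (List Int)) (m : Int) (out : List Int) : Decidable (Spec_calculate_final_result func_vals poly_degrees m out) := by unfold Spec_calculate_final_result; infer_instance

-- ===== CLAIM (what is proved, stated in full; the proofs are below) =====
def Claim_equal_calculate_final_result : Prop := ∀ (func_vals : List Int) (poly_degrees : List (List Int)) (m : Int), Dom_calculate_final_result func_vals poly_degrees m → Pre_calculate_final_result func_vals poly_degrees m → Spec_calculate_final_result func_vals poly_degrees m (calculate_final_result func_vals poly_degrees m)

-- ===== LEMMAS AND PROOFS =====

theorem pv_ensure_mod (x : Int) :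
    ensure_non_negative (PySem.Int.mod x pvMod) = PySem.Int.mod x pvMod := by
  have hpos : (0 : Int) < pvMod := by norm_num [pvMod]
  rw [PySem.Int.mod_eq_emod_of_pos hpos]
  have := Int.emod_nonneg x (by norm_num [pvMod] : pvMod ≠ 0)
  unfold ensure_non_negative
  rw [if_neg (by omega)]

theorem pv_fold_nil (L : List (Int × List Int)) :
    L.foldl (fun a p => (a.zip p.2).map (fun q => q.1 + PySem.Int.mod (p.1 * q.2) pvMod))
      ([] : List Int) = [] := by
  induction L with
  | nil => rfl
  | cons p L ih => simpa using ih

theorem pv_getD_replicate (n i : Nat) : (List.replicate n (0:Int)).getD i 0 = 0 := by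
  rw [List.getD_eq_getElem?_getD, List.getElem?_replicate]
  by_cases h : i < n <;> simp [h]

theorem pv_Bfold (L : List (Int × List Int)) (acc : List Int)
    (h : ∀ p ∈ L, acc.length ≤ p.2.length) :
    L.foldl (fun a p => (a.zip p.2).map (fun q => q.1 + PySem.Int.mod (p.1 * q.2) pvMod)) acc
      = (List.range acc.length).map
          (fun i => acc.getD i 0 + (L.map (fun p => PySem.Int.mod (p.1 * p.2.getD i 0) pvMod)).sum) := by
  induction L generalizing acc with
  | nil =>
    simp only [List.foldl_nil, List.map_nil, List.sum_nil, add_zero]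
    apply List.ext_getElem (by simp)
    intro i h1 h2
    rw [List.getElem_map, List.getElem_range]
    exact (List.getD_eq_getElem acc 0 h1).symm
  | cons p L ih =>
    have hlen : acc.length ≤ p.2.length := h p (by simp)
    have hacc' : ((acc.zip p.2).map (fun q => q.1 + PySem.Int.mod (p.1 * q.2) pvMod)).length = acc.length := by
      simp [List.length_zip]; omega
    rw [List.foldl_cons, ih _ (by intro q hq; rw [hacc']; exact h q (by simp [hq])), hacc']
    apply List.map_congr_left
    intro i hi
    rw [List.mem_range] at hi
    have hi2 : i < p.2.length := by omega
    have hmapl : i < ((acc.zip p.2).map (fun q => q.1 + PySem.Int.mod (p.1 * q.2) pvMod)).length := by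
      rw [hacc']; exact hi
    rw [List.map_cons, List.sum_cons,
      List.getD_eq_getElem _ _ hmapl, List.getD_eq_getElem _ _ hi,
      List.getD_eq_getElem _ _ hi2, List.getElem_map]
    have hz : i < (acc.zip p.2).length := by simp [List.length_zip]; omega
    rw [List.getElem_zip]
    ring

theorem pv_zip_take (fv : List Int) (pd : List (List Int)) (n : Nat)
    (h1 : n ≤ fv.length) (h2 : n ≤ pd.length) :
    (fv.take n).zip (pd.take n)
      = (List.range n).map (fun j => (fv.getD j 0, pd.getD j [])) := by
  apply List.ext_getElem
  · simp [List.length_zip]; omega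
  · intro i ha hb
    have hi : i < n := by simpa using hb
    rw [List.getElem_map, List.getElem_range, List.getElem_zip, List.getElem_take,
      List.getElem_take, List.getD_eq_getElem fv 0 (by omega), List.getD_eq_getElem pd [] (by omega)]

-- ===== VERDICT (by name: the statement is the Claim_ definition above) =====
theorem calculate_final_result_spec : Claim_equal_calculate_final_result := by
  intro fv pd m _ hpre
  unfold Spec_calculate_final_result calculate_final_result calculate_final_result_alt
  by_cases hm : m ≤ 0
  · rw [PySem.List.pyRange_one_eq_nil hm]
    simp [max_eq_right hm, pv_fold_nil]
  · rw [not_le] at hm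
    set n := m.toNat with hn
    have hmn : ((n : Int)) = m := Int.toNat_of_nonneg (le_of_lt hm)
    rcases hpre with hle | ⟨h1, h2, h3⟩
    · omega
    -- A side: the append loop is a map over the range
    rw [PySem.List.foldl_append_singleton_eq_map, List.nil_append]
    -- B side: slices are takes, the scatter fold is characterised by pv_Bfold
    rw [PySem.List.slice_to fv (le_of_lt hm), PySem.List.slice_to pd (le_of_lt hm)]
    have hmax : (max m 0).toNat = n := by omega
    rw [hmax]
    rw [pv_Bfold ((fv.take n).zip (pd.take n)) (List.replicate n 0)
      (by
        intro p hp
        rw [List.length_replicate]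
        exact h3 p.2 (List.of_mem_zip hp).2)]
    simp only [List.length_replicate, pv_getD_replicate, zero_add, List.map_map]
    rw [← hmn, PySem.List.pyRange_zero_natCast, List.map_map]
    apply List.map_congr_left
    intro i hi
    rw [List.mem_range] at hi
    simp only [Function.comp]
    rw [PySem.List.foldl_add, zero_add, pv_ensure_mod]
    congr 1
    rw [pv_zip_take fv pd n h1 h2]
    simp only [List.map_map]
    apply congrArg
    apply List.map_congr_left
    intro j hj
    simp [Function.comp, PySem.List.pyGetD_natCast]
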